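-- pv_equiv track=rewrite | github.com/afahimi/eng-intern-challenge | python/translator.py | to_braile
-- ===== SOURCE A (Python) =====
-- numbers = { '0': '.OOO..', '1': 'O.....', '2': 'O.O...', '3': 'OO....', '4': 'OO.O..', '5': 'O..O..', '6': 'OOO...', '7': 'OOOO..', '8': 'O.OO..', '9': '.OO...' }
--
-- letters = {
--     'a': 'O.....', 'b': 'O.O...','c': 'OO....','d': 'OO.O..','e': 'O..O..','f': 'OOO...','g': 'OOOO..','h': 'O.OO..','i': '.OO...','j': '.OOO..','k': 'O...O.','l': 'O.O.O.','m': 'OO..O.','n': 'OO.OO.','o': 'O..OO.','p': 'OOO.O.','q': 'OOOOO.','r': 'O.OOO.','s': '.OO.O.','t': '.OOOO.','u': 'O...OO','v': 'O.O.OO','w': '.OOO.O','x': 'OO..OO','y': 'OO.OOO','z': 'O..OOO', ' ': '......'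
-- }
--
-- capital_follows = '.....O'
--
-- number_follows = '.O.OOO'
--
-- def to_braile(arguments):
--     phrase = ' '.join(arguments)
--     result = []
--
--     for i in range(len(phrase)):
--         if phrase[i].isupper():
--             result.append(capital_follows)
--             result.append(letters[phrase[i].lower()])
--         elif phrase[i].isdigit():
--             # Check if we have added an indicator already
--             if i > 0 and phrase[i-1] == ' ':
--                 result.append(number_follows)
--             result.append(numbers[phrase[i]])
--         else:
--             result.append(letters[phrase[i]])
--
--     return ''.join(result)
-- ===== SOURCE B (Python) =====
-- numbers = { '0': '.OOO..', '1': 'O.....', '2': 'O.O...', '3': 'OO....', '4': 'OO.O..', '5': 'O..O..', '6': 'OOO...', '7': 'OOOO..', '8': 'O.OO..', '9': '.OO...' }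
--
-- letters = {
--     'a': 'O.....', 'b': 'O.O...','c': 'OO....','d': 'OO.O..','e': 'O..O..','f': 'OOO...','g': 'OOOO..','h': 'O.OO..','i': '.OO...','j': '.OOO..','k': 'O...O.','l': 'O.O.O.','m': 'OO..O.','n': 'OO.OO.','o': 'O..OO.','p': 'OOO.O.','q': 'OOOOO.','r': 'O.OOO.','s': '.OO.O.','t': '.OOOO.','u': 'O...OO','v': 'O.O.OO','w': '.OOO.O','x': 'OO..OO','y': 'OO.OOO','z': 'O..OOO', ' ': '......'
-- }
--
-- capital_follows = '.....O'
--
-- number_follows = '.O.OOO'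
--
--
-- def _cell(ch):
--     if ch.isupper():
--         return capital_follows + letters[ch.lower()]
--     elif ch.isdigit():
--         return numbers[ch]
--     else:
--         return letters[ch]
--
--
-- def _word(word):
--     return ''.join(_cell(ch) for ch in word)
--
--
-- def to_braile(arguments):
--     # Word-wise translation: split the joined phrase on ' ' (keeping empty
--     # words), emit the space cell between words and the number indicator
--     # exactly when a non-first word starts with a digit.
--     words = ' '.join(arguments).split(' ')
--     out = _word(words[0])
--     for word in words[1:]:
--         out += letters[' ']
--         if word and word[0].isdigit():
--             out += number_follows
--         out += _word(word)
--     return out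
-- ===== Notes on version B (the rewrite author's own statement) =====
-- stated objective: alternative
-- what changed: A scans the joined phrase character-by-character over an index range, consulting phrase[i-1] to decide the number indicator; B splits the phrase into words on ' ' and translates word-wise, emitting the indicator exactly for non-first words whose first character is a digit, with no index arithmetic or prev-character lookups.
import Mathlib
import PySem

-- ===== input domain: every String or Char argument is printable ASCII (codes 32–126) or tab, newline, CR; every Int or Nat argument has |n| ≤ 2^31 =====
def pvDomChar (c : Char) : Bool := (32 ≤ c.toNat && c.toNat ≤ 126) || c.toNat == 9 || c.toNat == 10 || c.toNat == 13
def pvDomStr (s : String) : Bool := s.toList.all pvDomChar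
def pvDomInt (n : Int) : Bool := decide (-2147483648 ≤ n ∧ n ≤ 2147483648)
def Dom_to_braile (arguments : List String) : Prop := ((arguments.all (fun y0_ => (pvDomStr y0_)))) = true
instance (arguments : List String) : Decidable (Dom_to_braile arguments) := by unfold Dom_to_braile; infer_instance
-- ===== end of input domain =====

-- B translates the phrase word-by-word after splitting on ' ' instead of A's indexed
-- character scan with a phrase[i-1] lookup; same O(n) cost, different decomposition.


-- ===== PORT A =====
-- shared module-level constants (the Python module's `numbers`, `letters`,
-- `capital_follows`, `number_follows`; both A and B read them)
def pvNumbers : PySem.Dict Char (List Char) := PySem.Dict.ofList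
  [('0', ".OOO..".toList), ('1', "O.....".toList), ('2', "O.O...".toList), ('3', "OO....".toList),
   ('4', "OO.O..".toList), ('5', "O..O..".toList), ('6', "OOO...".toList), ('7', "OOOO..".toList),
   ('8', "O.OO..".toList), ('9', ".OO...".toList)]

def pvLetters : PySem.Dict Char (List Char) := PySem.Dict.ofList
  [('a', "O.....".toList), ('b', "O.O...".toList), ('c', "OO....".toList), ('d', "OO.O..".toList),
   ('e', "O..O..".toList), ('f', "OOO...".toList), ('g', "OOOO..".toList), ('h', "O.OO..".toList),
   ('i', ".OO...".toList), ('j', ".OOO..".toList), ('k', "O...O.".toList), ('l', "O.O.O.".toList),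
   ('m', "OO..O.".toList), ('n', "OO.OO.".toList), ('o', "O..OO.".toList), ('p', "OOO.O.".toList),
   ('q', "OOOOO.".toList), ('r', "O.OOO.".toList), ('s', ".OO.O.".toList), ('t', ".OOOO.".toList),
   ('u', "O...OO".toList), ('v', "O.O.OO".toList), ('w', ".OOO.O".toList), ('x', "OO..OO".toList),
   ('y', "OO.OOO".toList), ('z', "O..OOO".toList), (' ', "......".toList)]

def pvCapitalFollows : List Char := ".....O".toList
def pvNumberFollows : List Char := ".O.OOO".toList

-- the body of A's `for i in range(len(phrase))` loop; `letters[...]`/`numbers[...]`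
-- lookups inlined, KeyError (Dict.get? = none) excluded by Pre_to_braile
def pvAStep (phrase : List Char) (res : List (List Char)) (i : Int) : List (List Char) :=
  let c := PySem.List.pyGetD phrase i ' '
  if PySem.Chars.isupper c then
    res ++ [pvCapitalFollows, (pvLetters.get? (PySem.Chars.lowerChar c)).getD []]
  else if PySem.Chars.isdigit c then
    (if 0 < i ∧ PySem.List.pyGetD phrase (i - 1) ' ' = ' ' then res ++ [pvNumberFollows] else res)
      ++ [(pvNumbers.get? c).getD []]
  else
    res ++ [(pvLetters.get? c).getD []]

def to_braile (arguments : List String) : String :=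
  let phrase : List Char := PySem.Chars.join [' '] (arguments.map String.toList)
  let result : List (List Char) :=
    (PySem.List.pyRange 0 (phrase.length : Int) 1).foldl (pvAStep phrase) []
  String.ofList (PySem.Chars.join [] result)

-- ===== PORT B =====
-- letters[c] / numbers[c] lookups for Source B; KeyError excluded by Pre_to_braile
def pvLetter (c : Char) : List Char := (pvLetters.get? c).getD []
def pvNumber (c : Char) : List Char := (pvNumbers.get? c).getD []

-- Source B's _cell(ch)
def pvCell (c : Char) : List Char :=
  if PySem.Chars.isupper c then pvCapitalFollows ++ pvLetter (PySem.Chars.lowerChar c)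
  else if PySem.Chars.isdigit c then pvNumber c
  else pvLetter c

-- Source B's _word(word)
def pvWordTrans (w : List Char) : List Char := PySem.Chars.join [] (w.map pvCell)

def to_braile_alt (arguments : List String) : String :=
  let words := PySem.Chars.splitOn
    (PySem.Chars.join [' '] (arguments.map String.toList)) [' ']
  let out := words.tail.foldl (fun out w =>
      out ++ pvLetter ' '
        ++ (match w with
            | [] => []
            | c :: _ => if PySem.Chars.isdigit c then pvNumberFollows else [])
        ++ pvWordTrans w)
    (pvWordTrans (words.headD []))
  String.ofList out

-- ===== PRECONDITION & SPEC =====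
-- Pre_ excludes exactly the inputs on which A raises KeyError: some character of some
-- argument is not an ASCII letter, digit or space, so `letters[...]`/`numbers[...]` misses.
def Pre_to_braile (arguments : List String) : Prop :=
  (arguments.all (fun s => s.toList.all (fun c =>
    PySem.Chars.isupper c || PySem.Chars.isdigit c
      || (decide ('a' ≤ c) && decide (c ≤ 'z')) || (c == ' ')))) = true
instance (arguments : List String) : Decidable (Pre_to_braile arguments) := by
  unfold Pre_to_braile; infer_instance

def pvWitness_to_braile : List String := ["Abc 12", "x9"]

def Spec_to_braile (arguments : List String) (out : String) : Prop := out = to_braile_alt arguments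
instance (arguments : List String) (out : String) : Decidable (Spec_to_braile arguments out) := by
  unfold Spec_to_braile; infer_instance

-- ===== CLAIM (what is proved, stated in full; the proofs are below) =====
def Claim_equal_to_braile : Prop := ∀ (arguments : List String), Dom_to_braile arguments → Pre_to_braile arguments → Spec_to_braile arguments (to_braile arguments)

-- ===== LEMMAS AND PROOFS =====

-- character classes are disjoint where the proof needs it
theorem pv_isdigit_of_isupper {c : Char} (h : PySem.Chars.isupper c = true) :
    PySem.Chars.isdigit c = false := by
  simp only [PySem.Chars.isupper, PySem.Chars.isdigit, Bool.and_eq_true, decide_eq_true_eq,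
    Char.le_def, UInt32.le_iff_toNat_le] at h ⊢
  simp only [Bool.and_eq_false_iff, decide_eq_false_iff_not]
  have hA : 'A'.val.toNat = 65 := by decide
  have hZ : 'Z'.val.toNat = 90 := by decide
  have h0 : '0'.val.toNat = 48 := by decide
  have h9 : '9'.val.toNat = 57 := by decide
  omega

theorem pv_join_nil_flatten (xs : List (List Char)) : PySem.Chars.join [] xs = xs.flatten := by
  induction xs with
  | nil => simp [PySem.Chars.join_nil]
  | cons a l ih =>
    cases l with
    | nil => simp [PySem.Chars.join, List.intercalate]
    | cons b m =>
      simp [PySem.Chars.join, List.intercalate, List.intersperse] at ih ⊢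
      simpa using ih

-- the cells A appends for one character, `ps` = "previous phrase character is a space"
def pvCells (ps : Bool) (c : Char) : List (List Char) :=
  if PySem.Chars.isupper c then [pvCapitalFollows, pvLetter (PySem.Chars.lowerChar c)]
  else if PySem.Chars.isdigit c then (if ps then [pvNumberFollows] else []) ++ [pvNumber c]
  else [pvLetter c]

-- structural form of A's scan
def pvScanCells (ps : Bool) : List Char → List (List Char)
  | [] => []
  | c :: cs => pvCells ps c ++ pvScanCells (c == ' ') cs

-- structural form of str.split(' ') : (first word, remaining words)
def pvSplit : List Char → List Char × List (List Char)
  | [] => ([], [])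
  | c :: cs =>
      let p := pvSplit cs
      if c = ' ' then ([], p.1 :: p.2) else (c :: p.1, p.2)

theorem pv_splitOn_go_eq : ∀ (fuel : Nat) (l cur : List Char) (acc : List (List Char)),
    l.length ≤ fuel →
    PySem.Chars.splitOn.go [' '] fuel l cur acc
      = acc.reverse ++ (cur.reverse ++ (pvSplit l).1) :: (pvSplit l).2 := by
  intro fuel
  induction fuel with
  | zero =>
    intro l cur acc hl
    have : l = [] := List.eq_nil_of_length_eq_zero (Nat.le_zero.mp hl)
    subst this
    simp [PySem.Chars.splitOn.go, pvSplit]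
  | succ n ih =>
    intro l cur acc hl
    cases l with
    | nil => simp [PySem.Chars.splitOn.go, pvSplit]
    | cons c rest =>
      by_cases hc : c = ' '
      · subst hc
        have hpref : [' '].isPrefixOf (' ' :: rest) = true := by simp [List.isPrefixOf]
        rw [PySem.Chars.splitOn.go, if_pos hpref]
        simp only [List.length_cons] at hl
        rw [show List.drop [' '].length (' ' :: rest) = rest from rfl]
        rw [ih rest [] (cur.reverse :: acc) (by omega)]
        simp [pvSplit]
      · have hpref : [' '].isPrefixOf (c :: rest) = false := by
          simp [List.isPrefixOf]; exact fun h => absurd h.symm hc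
        rw [PySem.Chars.splitOn.go, if_neg (by simp [hpref])]
        simp only [List.length_cons] at hl
        rw [ih rest (c :: cur) acc (by omega)]
        simp [pvSplit, hc]

theorem pv_splitOn_space (cs : List Char) :
    PySem.Chars.splitOn cs [' '] = (pvSplit cs).1 :: (pvSplit cs).2 := by
  unfold PySem.Chars.splitOn
  rw [pv_splitOn_go_eq (cs.length + 1) cs [] [] (by omega)]
  simp

-- A's indexed foldl over the suffix `cs` of `pre ++ cs` is the structural scan of `cs`
theorem pv_foldlA_eq_scan : ∀ (cs pre : List Char) (res : List (List Char)),
    (PySem.List.pyRange (pre.length : Int) ((pre.length : Int) + cs.length) 1).foldl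
        (pvAStep (pre ++ cs)) res
      = res ++ pvScanCells (pre.getLast? == some ' ') cs := by
  intro cs
  induction cs with
  | nil =>
    intro pre res
    rw [PySem.List.pyRange_one_eq_nil (by simp)]
    simp [pvScanCells]
  | cons c cs' ih =>
    intro pre res
    rw [PySem.List.pyRange_one_cons (by simp)]
    have hget : PySem.List.pyGetD (pre ++ c :: cs') (pre.length : Int) ' ' = c := by
      rw [PySem.List.pyGetD_natCast]
      simp [List.getD]
    have hguard : ((0 : Int) < (pre.length : Int)
          ∧ PySem.List.pyGetD (pre ++ c :: cs') ((pre.length : Int) - 1) ' ' = ' ')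
        ↔ (pre.getLast? == some ' ') = true := by
      cases pre with
      | nil => simp
      | cons p ps =>
        have hlen : (((p :: ps).length : Int) - 1) = (((p :: ps).length - 1 : Nat) : Int) := by
          simp
        constructor
        · rintro ⟨-, hsp⟩
          rw [hlen, PySem.List.pyGetD_natCast] at hsp
          have hlt : (p :: ps).length - 1 < (p :: ps).length := by simp
          rw [List.getD, List.getElem?_append_left hlt] at hsp
          simp only [List.getElem?_eq_getElem hlt, Option.getD_some] at hsp
          simp only [List.length_cons, Nat.add_sub_cancel] at hsp
          rw [List.getLast?_eq_getElem?]
          simp only [List.length_cons, Nat.add_sub_cancel,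
            List.getElem?_eq_getElem (by simp : ps.length < (p :: ps).length)]
          simpa using hsp
        · intro hsp
          refine ⟨by exact_mod_cast Nat.succ_pos ps.length, ?_⟩
          rw [List.getLast?_eq_getElem?] at hsp
          have hlt : (p :: ps).length - 1 < (p :: ps).length := by simp
          rw [List.getElem?_eq_getElem hlt] at hsp
          simp only [Option.some_beq_some, beq_iff_eq] at hsp
          rw [hlen, PySem.List.pyGetD_natCast, List.getD, List.getElem?_append_left hlt]
          simp only [List.getElem?_eq_getElem hlt, Option.getD_some]
          simp only [List.length_cons, Nat.add_sub_cancel] at hsp ⊢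
          exact hsp
    have hstep : pvAStep (pre ++ c :: cs') res (pre.length : Int)
        = res ++ pvCells (pre.getLast? == some ' ') c := by
      unfold pvAStep pvCells
      simp only [pvLetter, pvNumber]
      rw [hget]
      by_cases hu : PySem.Chars.isupper c = true
      · simp [hu]
      · by_cases hd : PySem.Chars.isdigit c = true
        · simp only [hu, if_false, hd, if_true, Bool.not_eq_true] at *
          by_cases hps : (pre.getLast? == some ' ') = true
          · rw [if_pos (hguard.mpr hps), hps]; simp
          · rw [if_neg (fun hcon => hps (hguard.mp hcon))]
            simp only [Bool.not_eq_true] at hps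
            rw [hps]; simp
        · simp [hu, hd]
    rw [List.foldl_cons, hstep]
    have hpre : pre ++ c :: cs' = (pre ++ [c]) ++ cs' := by simp
    have hlen1 : ((pre.length : Int) + 1) = (((pre ++ [c]).length : Nat) : Int) := by
      simp
    have hlen2 : ((pre.length : Int) + (c :: cs').length) = (((pre ++ [c]).length : Nat) : Int) + cs'.length := by
      simp; omega
    rw [hpre, hlen1, hlen2, ih (pre ++ [c]) (res ++ pvCells (pre.getLast? == some ' ') c)]
    simp [pvScanCells]

-- the indicator B emits in front of a word when the previous character was a space
def pvInd (ps : Bool) (w : List Char) : List Char :=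
  if ps then
    (match w with
     | [] => []
     | c :: _ => if PySem.Chars.isdigit c then pvNumberFollows else [])
  else []

-- what B appends for one non-first word
def pvG (w : List Char) : List Char :=
  pvLetter ' '
    ++ (match w with
        | [] => []
        | c :: _ => if PySem.Chars.isdigit c then pvNumberFollows else [])
    ++ pvWordTrans w

-- the heart of the equivalence: A's flattened scan is B's word-wise output
theorem pv_scan_eq_words : ∀ (cs : List Char) (ps : Bool),
    (pvScanCells ps cs).flatten
      = pvInd ps (pvSplit cs).1 ++ pvWordTrans (pvSplit cs).1 ++ ((pvSplit cs).2.flatMap pvG) := by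
  intro cs
  induction cs with
  | nil => intro ps; simp [pvScanCells, pvSplit, pvInd, pvWordTrans, PySem.Chars.join_nil]
  | cons c cs' ih =>
    intro ps
    by_cases hc : c = ' '
    · subst hc
      have hcell : pvCells ps ' ' = [pvLetter ' '] := by
        have h1 : PySem.Chars.isupper ' ' = false := by decide
        have h2 : PySem.Chars.isdigit ' ' = false := by decide
        simp [pvCells, h1, h2]
      have hsplit : pvSplit (' ' :: cs') = ([], (pvSplit cs').1 :: (pvSplit cs').2) := by
        simp [pvSplit]
      have hbeq : (' ' == ' ') = true := rfl
      simp only [pvScanCells, hcell, hsplit, hbeq, List.flatten_append]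
      rw [ih true]
      simp [pvInd, pvWordTrans, PySem.Chars.join_nil, pvG]
    · have hbeq : (c == ' ') = false := by simp [hc]
      have hword : pvWordTrans (c :: (pvSplit cs').1) = pvCell c ++ pvWordTrans (pvSplit cs').1 := by
        simp [pvWordTrans, pv_join_nil_flatten]
      have hcells : (pvCells ps c).flatten = pvInd ps (c :: (pvSplit cs').1) ++ pvCell c := by
        by_cases hu : PySem.Chars.isupper c = true
        · have hd : PySem.Chars.isdigit c = false := pv_isdigit_of_isupper hu
          cases ps <;> simp [pvCells, pvCell, pvInd, hu, hd]
        · simp only [Bool.not_eq_true] at hu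
          by_cases hd : PySem.Chars.isdigit c = true
          · cases ps <;> simp [pvCells, pvCell, pvInd, hu, hd]
          · simp only [Bool.not_eq_true] at hd
            cases ps <;> simp [pvCells, pvCell, pvInd, hu, hd]
      simp only [pvScanCells, pvSplit, if_neg hc, hbeq, List.flatten_append, ih false]
      simp only [pvInd, if_neg (by simp : ¬ (false = true)), List.nil_append, hword, hcells]
      simp
-- ===== VERDICT (by name: the statement is the Claim_ definition above) =====
theorem to_braile_spec : Claim_equal_to_braile := by
  intro arguments _ _
  unfold Spec_to_braile
  show to_braile arguments = to_braile_alt arguments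
  simp only [to_braile, to_braile_alt]
  generalize (PySem.Chars.join [' '] (arguments.map String.toList)) = phrase
  congr 1
  -- A side: indexed fold → structural scan
  have hA : (PySem.List.pyRange 0 (phrase.length : Int) 1).foldl (pvAStep phrase) []
      = pvScanCells false phrase := by
    have := pv_foldlA_eq_scan phrase [] []
    simpa using this
  rw [hA, pv_join_nil_flatten]
  -- B side: split → (head, tail), fold of appends → flatMap
  rw [pv_splitOn_space phrase]
  simp only [List.headD_cons, List.tail_cons]
  have hB : ((pvSplit phrase).2).foldl (fun out w =>
        out ++ pvLetter ' '
          ++ (match w with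
              | [] => []
              | c :: _ => if PySem.Chars.isdigit c then pvNumberFollows else [])
          ++ pvWordTrans w)
      (pvWordTrans (pvSplit phrase).1)
      = pvWordTrans (pvSplit phrase).1 ++ ((pvSplit phrase).2.flatMap pvG) := by
    have := PySem.List.foldl_append_eq_flatMap pvG (pvSplit phrase).2
      (pvWordTrans (pvSplit phrase).1)
    rw [← this]
    have hfun : (fun (out : List Char) (w : List Char) =>
        out ++ pvLetter ' '
          ++ (match w with
              | [] => []
              | c :: _ => if PySem.Chars.isdigit c then pvNumberFollows else [])
          ++ pvWordTrans w)
        = (fun out w => out ++ pvG w) := by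
      funext out w
      simp [pvG]
    rw [hfun]
  rw [hB]
  have := pv_scan_eq_words phrase false
  simpa [pvInd] using this
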